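-- pv_equiv track=rewrite | github.com/hshrimp/letecode_for_me | letecode/other/剑指offer/05.py | replaceSpace2
-- ===== SOURCE A (Python) =====
-- def replaceSpace2(s: str) -> str:
--     p = ''
--     for i, c in enumerate(s):
--         if c == ' ':
--             p += '%20'
--         else:
--             p += c
--     return p
-- ===== SOURCE B (Python) =====
-- def replaceSpace2(s: str) -> str:
--     parts = s.split(' ')
--     return '%20'.join(parts)
-- ===== Notes on version B (the rewrite author's own statement) =====
-- stated objective: faster
-- what changed: B splits the string on single spaces and joins the segments with the three-character escape sequence, instead of A's per-character loop with repeated string concatenation.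
import Mathlib
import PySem

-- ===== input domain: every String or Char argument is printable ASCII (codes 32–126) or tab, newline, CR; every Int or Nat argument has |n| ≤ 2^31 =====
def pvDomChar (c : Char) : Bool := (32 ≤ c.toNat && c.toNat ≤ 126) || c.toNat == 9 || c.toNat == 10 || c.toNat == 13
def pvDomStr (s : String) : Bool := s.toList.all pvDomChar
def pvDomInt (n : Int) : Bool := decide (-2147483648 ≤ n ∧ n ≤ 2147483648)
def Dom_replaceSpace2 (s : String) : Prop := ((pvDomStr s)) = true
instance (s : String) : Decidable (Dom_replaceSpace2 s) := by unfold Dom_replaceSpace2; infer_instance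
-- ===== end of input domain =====

-- B replaces A's per-character loop with split on ' ' joined by '%20' (idiomatic decomposition; return values identical).

-- ===== PORT A =====
-- for i, c in enumerate(s): p += '%20' if c==' ' else c
def replaceSpace2 (s : String) : String :=
  String.mk ((PySem.List.enumerate s.toList).foldl
    (fun p ic => if ic.2 = ' ' then p ++ "%20".toList else p ++ [ic.2]) [])

-- ===== PORT B =====
-- parts = s.split(' '); return '%20'.join(parts)
def replaceSpace2_alt (s : String) : String :=
  String.mk (PySem.Chars.join "%20".toList (PySem.Chars.splitOn s.toList [' ']))

-- ===== PRECONDITION & SPEC =====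
def Spec_replaceSpace2 (s : String) (out : String) : Prop := out = replaceSpace2_alt s
instance (s : String) (out : String) : Decidable (Spec_replaceSpace2 s out) := by unfold Spec_replaceSpace2; infer_instance

-- ===== CLAIM (what is proved, stated in full; the proofs are below) =====
def Claim_equal_replaceSpace2 : Prop := ∀ (s : String), Dom_replaceSpace2 s → Spec_replaceSpace2 s (replaceSpace2 s)

-- ===== LEMMAS AND PROOFS =====

-- what one space-or-char contributes to the output
def pvGlue (c : Char) : List Char := if c = ' ' then "%20".toList else [c]

-- splitOn specialised to the single-space separator, without fuel or reversed accumulator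
def pvSplit : List Char → List Char → List (List Char)
  | [], cur => [cur.reverse]
  | c :: rest, cur => if c = ' ' then cur.reverse :: pvSplit rest [] else pvSplit rest (c :: cur)

theorem pvSplit_ne_nil (l cur : List Char) : pvSplit l cur ≠ [] := by
  induction l generalizing cur with
  | nil => simp [pvSplit]
  | cons c rest ih =>
    simp only [pvSplit]
    split_ifs
    · simp
    · exact ih _

theorem go_eq_pvSplit (fuel : Nat) (l cur : List Char) (acc : List (List Char))
    (h : l.length ≤ fuel) :
    PySem.Chars.splitOn.go [' '] fuel l cur acc = acc.reverse ++ pvSplit l cur := by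
  induction fuel generalizing l cur acc with
  | zero =>
    have : l = [] := List.length_eq_zero_iff.mp (Nat.le_zero.mp h)
    subst this
    simp [PySem.Chars.splitOn.go, pvSplit]
  | succ n ih =>
    cases l with
    | nil => simp [PySem.Chars.splitOn.go, pvSplit]
    | cons c rest =>
      simp only [PySem.Chars.splitOn.go, List.isPrefixOf, pvSplit]
      by_cases hc : c = ' '
      · subst hc
        simp only [beq_self_eq_true, Bool.true_and, if_true, List.length_cons] at *
        simp only [List.length_nil, List.drop_succ_cons, List.drop_zero,
          ih rest [] (cur.reverse :: acc) (Nat.succ_le_succ_iff.mp h)]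
        simp
      · have hb : (' ' == c && true) = false := by
          simp; exact fun h' => hc h'.symm
        rw [if_neg hc]
        simp only [hb, Bool.false_eq_true, if_false]
        exact ih rest (c :: cur) acc (by simpa using Nat.succ_le_succ_iff.mp h)

theorem join_pvSplit (l cur : List Char) :
    PySem.Chars.join "%20".toList (pvSplit l cur) = cur.reverse ++ l.flatMap pvGlue := by
  induction l generalizing cur with
  | nil => simp [pvSplit, PySem.Chars.join_singleton]
  | cons c rest ih =>
    simp only [pvSplit, List.flatMap_cons]
    by_cases hc : c = ' '
    · subst hc
      rw [if_pos rfl]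
      obtain ⟨p, ps, hps⟩ := List.exists_cons_of_ne_nil (pvSplit_ne_nil rest [])
      rw [hps, PySem.Chars.join_cons_cons, ← hps, ih]
      simp [pvGlue]
    · rw [if_neg hc, ih]
      simp [pvGlue, if_neg hc]

theorem enumerate_foldl (l : List Char) (start : Int) (p : List Char) :
    (PySem.List.enumerate l start).foldl
      (fun p ic => if ic.2 = ' ' then p ++ "%20".toList else p ++ [ic.2]) p
      = p ++ l.flatMap pvGlue := by
  induction l generalizing start p with
  | nil => simp [PySem.List.enumerate]
  | cons c rest ih =>
    simp only [PySem.List.enumerate, List.foldl_cons, List.flatMap_cons]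
    by_cases hc : c = ' '
    · rw [if_pos hc, ih]; simp [pvGlue, hc]
    · rw [if_neg hc, ih]; simp [pvGlue, if_neg hc]

-- ===== VERDICT (by name: the statement is the Claim_ definition above) =====
theorem replaceSpace2_spec : Claim_equal_replaceSpace2 := by
  intro s _
  unfold Spec_replaceSpace2 replaceSpace2 replaceSpace2_alt PySem.Chars.splitOn
  rw [enumerate_foldl, go_eq_pvSplit _ _ _ _ (Nat.le_succ _)]
  simp only [List.reverse_nil, List.nil_append]
  rw [join_pvSplit]
  simp
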